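-- pv_equiv track=rewrite | github.com/mahdihoumanii/glas | runs/qQtT_0001/Mathematica/extend.py | choose_step_index
-- ===== SOURCE A (Python) =====
-- from typing import Dict, Iterable, List, Optional, Sequence, Tuple
--
-- def choose_step_index(
--     a: Sequence[int],
--     delta: Sequence[int],
--     seen: Iterable[Tuple[int, ...]],
--     missing_indices: Sequence[int],
--     allowed_max_abs: int,
--     incoming_indices: Sequence[int],
--     outgoing_indices: Sequence[int],
-- ) -> Optional[int]:
--     """
--     Choose a step index k for shortest-path progress with routing priority:
--     1) missing basis directions first
--     2) steps that land on an existing node (if possible)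
--     3) incoming legs with negative step
--     4) outgoing legs with positive step
--     5) fallback basis order
--     """
--     candidates = [i for i, d in enumerate(delta) if d != 0]
--     if not candidates:
--         return None
--
--     def within_bounds(i: int) -> bool:
--         step = 1 if delta[i] > 0 else -1
--         return abs(a[i] + step) <= allowed_max_abs
--
--     candidates = [i for i in candidates if within_bounds(i)]
--     if not candidates:
--         return None
--
--     missing_first = [i for i in candidates if i in missing_indices]
--     if missing_first:
--         candidates = missing_first
--
--     def is_existing_step(i: int) -> bool:
--         step = 1 if delta[i] > 0 else -1
--         a_next = list(a)
--         a_next[i] += step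
--         return tuple(a_next) in seen
--
--     existing = [i for i in candidates if is_existing_step(i)]
--     if existing:
--         candidates = existing
--
--     incoming_neg = [i for i in candidates if i in incoming_indices and delta[i] < 0]
--     if incoming_neg:
--         return min(incoming_neg)
--
--     outgoing_pos = [i for i in candidates if i in outgoing_indices and delta[i] > 0]
--     if outgoing_pos:
--         return min(outgoing_pos)
--
--     return min(candidates)
-- ===== SOURCE B (Python) =====
-- def choose_step_index(
--     a,
--     delta,
--     seen,
--     missing_indices,
--     allowed_max_abs,
--     incoming_indices,
--     outgoing_indices,
-- ):
--     n = len(delta)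
--     candidates = [i for i in range(n) if delta[i] != 0]
--     if not candidates:
--         return None
--
--     def within_bounds(i):
--         step = 1 if delta[i] > 0 else -1
--         return abs(a[i] + step) <= allowed_max_abs
--
--     candidates = [i for i in candidates if within_bounds(i)]
--     if not candidates:
--         return None
--
--     missing_first = [i for i in candidates if i in missing_indices]
--     if missing_first:
--         candidates = missing_first
--
--     def is_existing_step(i):
--         step = 1 if delta[i] > 0 else -1
--         a_next = list(a)
--         a_next[i] += step
--         return tuple(a_next) in seen
--
--     def key(i):
--         e = 0 if is_existing_step(i) else 1
--         if i in incoming_indices and delta[i] < 0: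
--             c = 0
--         elif i in outgoing_indices and delta[i] > 0:
--             c = 1
--         else:
--             c = 2
--         return (e * 3 + c) * n + i
--
--     best = candidates[0]
--     for j in candidates[1:]:
--         if key(j) < key(best):
--             best = j
--     return best
-- ===== Notes on version B (the rewrite author's own statement) =====
-- stated objective: alternative
-- what changed: Replaces the three sequential filter-then-min passes (existing, incoming-negative, outgoing-positive, fallback) with a single argmin pass over the remaining candidates using one scalar priority key (existing-bit, leg class, index) encoded as (e*3+c)*n+i.
import Mathlib
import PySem

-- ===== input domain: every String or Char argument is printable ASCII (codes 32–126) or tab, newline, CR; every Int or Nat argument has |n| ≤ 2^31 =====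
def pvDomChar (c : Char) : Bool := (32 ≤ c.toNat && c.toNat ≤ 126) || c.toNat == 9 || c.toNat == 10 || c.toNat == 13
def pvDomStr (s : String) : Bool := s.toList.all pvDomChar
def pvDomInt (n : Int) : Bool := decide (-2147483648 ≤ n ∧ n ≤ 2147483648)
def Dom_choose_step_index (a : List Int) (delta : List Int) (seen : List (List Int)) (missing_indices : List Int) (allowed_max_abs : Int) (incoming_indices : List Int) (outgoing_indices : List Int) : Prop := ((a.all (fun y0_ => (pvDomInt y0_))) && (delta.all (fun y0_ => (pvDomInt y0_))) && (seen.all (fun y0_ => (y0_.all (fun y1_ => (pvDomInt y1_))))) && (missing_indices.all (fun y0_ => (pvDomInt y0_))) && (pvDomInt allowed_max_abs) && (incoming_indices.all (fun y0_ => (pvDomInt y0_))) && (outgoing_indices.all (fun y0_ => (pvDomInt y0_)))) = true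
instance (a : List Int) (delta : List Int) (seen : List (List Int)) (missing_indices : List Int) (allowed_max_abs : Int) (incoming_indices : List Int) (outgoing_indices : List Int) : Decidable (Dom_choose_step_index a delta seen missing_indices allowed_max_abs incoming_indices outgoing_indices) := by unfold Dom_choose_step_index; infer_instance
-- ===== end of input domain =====

-- B replaces A's sequential existing/incoming/outgoing/fallback passes by one argmin pass with a
-- layered scalar priority key; same return value (alternative decomposition, no speed claim).

-- ===== PORT A =====
-- A's within_bounds(i)
def aWithin (a delta : List Int) (allowed_max_abs : Int) (i : Nat) : Bool :=
  let step : Int := if delta.getD i 0 > 0 then 1 else -1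
  decide (|a.getD i 0 + step| ≤ allowed_max_abs)

-- A's is_existing_step(i)
def aExisting (a delta : List Int) (seen : List (List Int)) (i : Nat) : Bool :=
  let step : Int := if delta.getD i 0 > 0 then 1 else -1
  let a_next := a.set i (a.getD i 0 + step)
  decide (a_next ∈ seen)

def choose_step_index (a : List Int) (delta : List Int) (seen : List (List Int)) (missing_indices : List Int) (allowed_max_abs : Int) (incoming_indices : List Int) (outgoing_indices : List Int) : Option Int :=
  let candidates := (List.range delta.length).filter (fun i => delta.getD i 0 != 0)
  if candidates = [] then none else
  let candidates := candidates.filter (aWithin a delta allowed_max_abs)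
  if candidates = [] then none else
  let missing_first := candidates.filter (fun (i : Nat) => decide ((i : Int) ∈ missing_indices))
  let candidates := if missing_first = [] then candidates else missing_first
  let existing := candidates.filter (aExisting a delta seen)
  let candidates := if existing = [] then candidates else existing
  let incoming_neg := candidates.filter
    (fun (i : Nat) => decide ((i : Int) ∈ incoming_indices) && decide (delta.getD i 0 < 0))
  if incoming_neg ≠ [] then
    (PySem.List.min? incoming_neg (fun x => x)).map (fun i : Nat => (i : Int))
  else
    let outgoing_pos := candidates.filter
      (fun (i : Nat) => decide ((i : Int) ∈ outgoing_indices) && decide (delta.getD i 0 > 0))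
    if outgoing_pos ≠ [] then
      (PySem.List.min? outgoing_pos (fun x => x)).map (fun i : Nat => (i : Int))
    else
      (PySem.List.min? candidates (fun x => x)).map (fun i : Nat => (i : Int))

-- ===== PORT B =====
-- B's within_bounds(i) (Source B defines its own copy)
def bWithin (a delta : List Int) (allowed_max_abs : Int) (i : Nat) : Bool :=
  let step : Int := if delta.getD i 0 > 0 then 1 else -1
  decide (|a.getD i 0 + step| ≤ allowed_max_abs)

-- B's is_existing_step(i)
def bExisting (a delta : List Int) (seen : List (List Int)) (i : Nat) : Bool :=
  let step : Int := if delta.getD i 0 > 0 then 1 else -1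
  let a_next := a.set i (a.getD i 0 + step)
  decide (a_next ∈ seen)

-- B's key(i) = (e*3+c)*n + i
def bKey (a delta : List Int) (seen : List (List Int)) (incoming_indices outgoing_indices : List Int) (n : Nat) (i : Nat) : Nat :=
  ((if bExisting a delta seen i then 0 else 1) * 3 +
    (if decide ((i : Int) ∈ incoming_indices) && decide (delta.getD i 0 < 0) then 0
     else if decide ((i : Int) ∈ outgoing_indices) && decide (delta.getD i 0 > 0) then 1 else 2)) * n + i

-- the explicit argmin loop of Source B
def pickMinBy (K : Nat → Nat) (best : Nat) : List Nat → Nat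
  | [] => best
  | j :: rest => pickMinBy K (if K j < K best then j else best) rest

def choose_step_index_alt (a : List Int) (delta : List Int) (seen : List (List Int)) (missing_indices : List Int) (allowed_max_abs : Int) (incoming_indices : List Int) (outgoing_indices : List Int) : Option Int :=
  let n := delta.length
  let cands := (List.range n).filter (fun i => delta.getD i 0 != 0)
  if cands = [] then none else
  let cands := cands.filter (bWithin a delta allowed_max_abs)
  if cands = [] then none else
  let missing_first := cands.filter (fun (i : Nat) => decide ((i : Int) ∈ missing_indices))
  let cands := if missing_first = [] then cands else missing_first
  match cands with
  | [] => none  -- unreachable: cands is nonempty here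
  | b :: t => some ((pickMinBy (bKey a delta seen incoming_indices outgoing_indices n) b t : Nat) : Int)

-- ===== PRECONDITION & SPEC =====
-- Pre_ excludes exactly the inputs where Python A raises IndexError: a nonzero delta entry at an
-- index not valid for a (within_bounds then reads a[i]).
def Pre_choose_step_index (a : List Int) (delta : List Int) (seen : List (List Int)) (missing_indices : List Int) (allowed_max_abs : Int) (incoming_indices : List Int) (outgoing_indices : List Int) : Prop :=
  ∀ i : Nat, i < delta.length → delta.getD i 0 ≠ 0 → i < a.length
instance (a : List Int) (delta : List Int) (seen : List (List Int)) (missing_indices : List Int) (allowed_max_abs : Int) (incoming_indices : List Int) (outgoing_indices : List Int) : Decidable (Pre_choose_step_index a delta seen missing_indices allowed_max_abs incoming_indices outgoing_indices) := by unfold Pre_choose_step_index; infer_instance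

def pvWitness_choose_step_index : List Int × List Int × List (List Int) × List Int × Int × List Int × List Int :=
  ([0, 0], [1, -1], [[1, 0]], [1], 2, [0], [1])

def Spec_choose_step_index (a : List Int) (delta : List Int) (seen : List (List Int)) (missing_indices : List Int) (allowed_max_abs : Int) (incoming_indices : List Int) (outgoing_indices : List Int) (out : Option Int) : Prop := out = choose_step_index_alt a delta seen missing_indices allowed_max_abs incoming_indices outgoing_indices
instance (a : List Int) (delta : List Int) (seen : List (List Int)) (missing_indices : List Int) (allowed_max_abs : Int) (incoming_indices : List Int) (outgoing_indices : List Int) (out : Option Int) : Decidable (Spec_choose_step_index a delta seen missing_indices allowed_max_abs incoming_indices outgoing_indices out) := by unfold Spec_choose_step_index; infer_instance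

-- ===== CLAIM (what is proved, stated in full; the proofs are below) =====
def Claim_equal_choose_step_index : Prop := ∀ (a : List Int) (delta : List Int) (seen : List (List Int)) (missing_indices : List Int) (allowed_max_abs : Int) (incoming_indices : List Int) (outgoing_indices : List Int), Dom_choose_step_index a delta seen missing_indices allowed_max_abs incoming_indices outgoing_indices → Pre_choose_step_index a delta seen missing_indices allowed_max_abs incoming_indices outgoing_indices → Spec_choose_step_index a delta seen missing_indices allowed_max_abs incoming_indices outgoing_indices (choose_step_index a delta seen missing_indices allowed_max_abs incoming_indices outgoing_indices)

-- ===== LEMMAS AND PROOFS =====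

theorem pickMinBy_mem (K : Nat → Nat) (b : Nat) (t : List Nat) :
    pickMinBy K b t ∈ b :: t := by
  induction t generalizing b with
  | nil => simp [pickMinBy]
  | cons j rest ih =>
    show pickMinBy K (if K j < K b then j else b) rest ∈ b :: j :: rest
    have h := ih (if K j < K b then j else b)
    rcases List.mem_cons.1 h with h1 | h1
    · rw [h1]; split
      · exact List.mem_cons_of_mem _ List.mem_cons_self
      · exact List.mem_cons_self
    · exact List.mem_cons_of_mem _ (List.mem_cons_of_mem _ h1)

theorem pickMinBy_le (K : Nat → Nat) (b : Nat) (t : List Nat) :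
    ∀ j ∈ b :: t, K (pickMinBy K b t) ≤ K j := by
  induction t generalizing b with
  | nil => simp [pickMinBy]
  | cons j rest ih =>
    intro x hx
    have h := ih (if K j < K b then j else b)
    have hb : K (pickMinBy K (if K j < K b then j else b) rest) ≤ K (if K j < K b then j else b) :=
      h _ (List.mem_cons_self)
    rcases List.mem_cons.1 hx with rfl | hx'
    · simp only [pickMinBy]
      refine le_trans hb ?_
      split <;> omega
    · rcases List.mem_cons.1 hx' with rfl | hx'' <;> simp only [pickMinBy]
      · refine le_trans hb ?_
        split <;> omega
      · exact h _ (List.mem_cons_of_mem _ hx'')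

-- key arithmetic: q i * n + i with i, j < n
theorem key_le_of (n qi qj i j : Nat) (hi : i < n) (_ : j < n)
    (h : qi < qj ∨ (qi = qj ∧ i ≤ j)) : qi * n + i ≤ qj * n + j := by
  rcases h with h | ⟨rfl, h⟩
  · have h1 : qi * n + i < (qi + 1) * n := by
      have he : (qi + 1) * n = qi * n + n := by ring
      omega
    have h2 : (qi + 1) * n ≤ qj * n := Nat.mul_le_mul_right n h
    omega
  · omega

theorem key_inj (n qi qj i j : Nat) (hi : i < n) (hj : j < n)
    (h : qi * n + i = qj * n + j) : i = j := by
  have h1 : (qi * n + i) % n = i := by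
    rw [Nat.add_comm, Nat.add_mul_mod_self_right, Nat.mod_eq_of_lt hi]
  have h2 : (qj * n + j) % n = j := by
    rw [Nat.add_comm, Nat.add_mul_mod_self_right, Nat.mod_eq_of_lt hj]
  rw [h] at h1; omega

theorem step_lt (emin cmin e c : Nat) (h1 : emin < e) (h2 : cmin ≤ 2) :
    emin * 3 + cmin < e * 3 + c := by omega

-- the cascade's chosen element minimizes the layered key over all candidates
theorem cascade_min (E C0 C1 : Nat → Bool) (cand l' S : List Nat) (emin cmin m : Nat)
    (hcmin2 : cmin ≤ 2)
    (hSl : ∀ j ∈ S, j ∈ l') (hlc : ∀ j ∈ l', j ∈ cand)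
    (heval : ∀ j ∈ l', (if E j then 0 else 1) = emin)
    (hemem : ∀ j ∈ cand, (if E j then 0 else 1) = emin → j ∈ l')
    (hemin : ∀ j ∈ cand, emin ≤ (if E j then 0 else 1))
    (hcval : ∀ j ∈ S, (if C0 j then 0 else if C1 j then 1 else 2) = cmin)
    (hcmem : ∀ j ∈ l', (if C0 j then 0 else if C1 j then 1 else 2) = cmin → j ∈ S)
    (hcmin : ∀ j ∈ l', cmin ≤ (if C0 j then 0 else if C1 j then 1 else 2))
    (hmS : m ∈ S) (hmin : ∀ j ∈ S, m ≤ j) (n : Nat)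
    (hlt : ∀ i ∈ cand, i < n) :
    ∀ j ∈ cand,
      ((if E m then 0 else 1) * 3 + (if C0 m then 0 else if C1 m then 1 else 2)) * n + m ≤
      ((if E j then 0 else 1) * 3 + (if C0 j then 0 else if C1 j then 1 else 2)) * n + j := by
  intro j hj
  have hml' : m ∈ l' := hSl m hmS
  have hmc : m ∈ cand := hlc m hml'
  have hEm := heval m hml'
  have hCm := hcval m hmS
  apply key_le_of _ _ _ _ _ (hlt m hmc) (hlt j hj)
  by_cases hej : (if E j then 0 else 1) = emin
  · have hjl' : j ∈ l' := hemem j hj hej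
    by_cases hcj : (if C0 j then 0 else if C1 j then 1 else 2) = cmin
    · right
      refine ⟨?_, hmin j (hcmem j hjl' hcj)⟩
      rw [hEm, hCm, hej, hcj]
    · left
      rw [hEm, hCm, hej]
      have hlt' : cmin < (if C0 j then 0 else if C1 j then 1 else 2) :=
        Nat.lt_of_le_of_ne (hcmin j hjl') (Ne.symm hcj)
      exact Nat.add_lt_add_left hlt' (emin * 3)
  · left
    rw [hEm, hCm]
    have hlt' : emin < (if E j then 0 else 1) :=
      Nat.lt_of_le_of_ne (hemin j hj) (Ne.symm hej)
    exact step_lt emin cmin _ _ hlt' hcmin2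

-- min? with identity key: membership and minimality, nonempty extraction
theorem min?_exists (l : List Nat) (hne : l ≠ []) :
    ∃ m, PySem.List.min? l (fun x => x) = some m ∧ m ∈ l ∧ ∀ j ∈ l, m ≤ j := by
  cases h : PySem.List.min? l (fun x => x) with
  | none => exact absurd ((PySem.List.min?_eq_none_iff _ _).1 h) hne
  | some m => exact ⟨m, rfl, PySem.List.min?_mem h, fun j hj => PySem.List.min?_isMin h j hj⟩

-- the central equivalence: A's early-return cascade tail equals B's single argmin pass
theorem cascade_eq_pick (E C0 C1 : Nat → Bool) (n : Nat) (K : Nat → Nat)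
    (hK : ∀ i, K i = ((if E i then 0 else 1) * 3 + (if C0 i then 0 else if C1 i then 1 else 2)) * n + i)
    (cand : List Nat) (hlt : ∀ i ∈ cand, i < n) (b : Nat) (t : List Nat) (hbt : cand = b :: t) :
    (if (if cand.filter E = [] then cand else cand.filter E).filter C0 ≠ [] then
       (PySem.List.min? ((if cand.filter E = [] then cand else cand.filter E).filter C0) (fun x => x)).map (fun i : Nat => (i : Int))
     else if (if cand.filter E = [] then cand else cand.filter E).filter C1 ≠ [] then
       (PySem.List.min? ((if cand.filter E = [] then cand else cand.filter E).filter C1) (fun x => x)).map (fun i : Nat => (i : Int))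
     else
       (PySem.List.min? (if cand.filter E = [] then cand else cand.filter E) (fun x => x)).map (fun i : Nat => (i : Int)))
    = some ((pickMinBy K b t : Nat) : Int) := by
  set l' := if cand.filter E = [] then cand else cand.filter E with hl'
  have hne : cand ≠ [] := by rw [hbt]; simp
  have hlc : ∀ j ∈ l', j ∈ cand := by
    intro j hj
    rw [hl'] at hj
    split at hj
    · exact hj
    · exact (List.mem_filter.1 hj).1
  have hl'ne : l' ≠ [] := by
    rw [hl']; split
    · exact hne
    · assumption
  have heval : ∀ j ∈ l', (if E j then 0 else 1) = (if cand.filter E = [] then 1 else 0) := by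
    intro j hj
    rw [hl'] at hj
    by_cases hfe : cand.filter E = []
    · rw [if_pos hfe] at hj
      rw [if_pos hfe]
      have hno := List.filter_eq_nil_iff.mp hfe
      simp [hno j hj]
    · rw [if_neg hfe] at hj
      rw [if_neg hfe]
      simp [(List.mem_filter.1 hj).2]
  have hemem : ∀ j ∈ cand, (if E j then 0 else 1) = (if cand.filter E = [] then 1 else 0) → j ∈ l' := by
    intro j hj hv
    rw [hl']
    by_cases hfe : cand.filter E = []
    · rw [if_pos hfe]; exact hj
    · rw [if_neg hfe]
      rw [if_neg hfe] at hv
      have hEj : E j = true := by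
        by_contra h
        simp [h] at hv
      exact List.mem_filter.2 ⟨hj, hEj⟩
  have hemin : ∀ j ∈ cand, (if cand.filter E = [] then 1 else 0) ≤ (if E j then 0 else 1) := by
    intro j hj
    by_cases hfe : cand.filter E = []
    · rw [if_pos hfe]
      have hno := List.filter_eq_nil_iff.mp hfe
      simp [hno j hj]
    · rw [if_neg hfe]; omega
  have hpm_mem : pickMinBy K b t ∈ cand := by rw [hbt]; exact pickMinBy_mem K b t
  have hpm_le : ∀ j ∈ cand, K (pickMinBy K b t) ≤ K j := by
    rw [hbt]; exact pickMinBy_le K b t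
  have close : ∀ (S : List Nat) (cmin m : Nat), cmin ≤ 2 →
      (∀ j ∈ S, j ∈ l') →
      (∀ j ∈ S, (if C0 j then 0 else if C1 j then 1 else 2) = cmin) →
      (∀ j ∈ l', (if C0 j then 0 else if C1 j then 1 else 2) = cmin → j ∈ S) →
      (∀ j ∈ l', cmin ≤ (if C0 j then 0 else if C1 j then 1 else 2)) →
      m ∈ S → (∀ j ∈ S, m ≤ j) → m = pickMinBy K b t := by
    intro S cmin m hc2 hSl hcval hcmem hcmin hmS hmin
    have hKm : ∀ j ∈ cand, K m ≤ K j := by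
      intro j hj
      rw [hK m, hK j]
      exact cascade_min E C0 C1 cand l' S _ cmin m hc2 hSl hlc heval hemem hemin
        hcval hcmem hcmin hmS hmin n hlt j hj
    have hmc : m ∈ cand := hlc m (hSl m hmS)
    have heq : K m = K (pickMinBy K b t) :=
      le_antisymm (hKm _ hpm_mem) (hpm_le m hmc)
    rw [hK m, hK (pickMinBy K b t)] at heq
    exact key_inj n _ _ _ _ (hlt m hmc) (hlt _ hpm_mem) heq
  by_cases hinc : l'.filter C0 = []
  · have hnoC0 : ∀ j ∈ l', ¬ C0 j = true := List.filter_eq_nil_iff.mp hinc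
    rw [if_neg (by simpa using hinc)]
    by_cases hout : l'.filter C1 = []
    · have hnoC1 : ∀ j ∈ l', ¬ C1 j = true := List.filter_eq_nil_iff.mp hout
      obtain ⟨m, hm, hmS, hmin⟩ := min?_exists l' hl'ne
      have hmeq : m = pickMinBy K b t := by
        apply close l' 2 m (by omega) (fun j hj => hj)
          (fun j hj => by simp [hnoC0 j hj, hnoC1 j hj])
          (fun j hj _ => hj)
          (fun j hj => by simp [hnoC0 j hj, hnoC1 j hj])
          hmS hmin
      rw [if_neg (by simpa using hout), hm, hmeq]
      rfl
    · obtain ⟨m, hm, hmS, hmin⟩ := min?_exists _ hout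
      have hmeq : m = pickMinBy K b t := by
        apply close (l'.filter C1) 1 m (by omega)
          (fun j hj => (List.mem_filter.1 hj).1)
          (fun j hj => by
            have h1 := (List.mem_filter.1 hj).2
            have h0 := hnoC0 j (List.mem_filter.1 hj).1
            simp [h0, h1])
          (fun j hj hv => List.mem_filter.2 ⟨hj, by
            rw [if_neg (hnoC0 j hj)] at hv
            by_contra h
            rw [if_neg h] at hv
            omega⟩)
          (fun j hj => by
            rw [if_neg (hnoC0 j hj)]
            split <;> omega)
          hmS hmin
      rw [if_pos (by simpa using hout), hm, hmeq]
      rfl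
  · obtain ⟨m, hm, hmS, hmin⟩ := min?_exists _ hinc
    have hmeq : m = pickMinBy K b t := by
      apply close (l'.filter C0) 0 m (by omega)
        (fun j hj => (List.mem_filter.1 hj).1)
        (fun j hj => by simp [(List.mem_filter.1 hj).2])
        (fun j hj hv => List.mem_filter.2 ⟨hj, by
          by_contra h
          rw [if_neg h] at hv
          split at hv <;> omega⟩)
        (fun j hj => Nat.zero_le _) hmS hmin
    rw [if_pos (by simpa using hinc), hm, hmeq]
    rfl

-- ===== VERDICT (by name: the statement is the Claim_ definition above) =====
theorem choose_step_index_spec : Claim_equal_choose_step_index := by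
  intro a delta seen missing_indices allowed_max_abs incoming_indices outgoing_indices _ _
  unfold Spec_choose_step_index
  simp only [choose_step_index, choose_step_index_alt]
  set c1 := (List.range delta.length).filter (fun i => delta.getD i 0 != 0) with hc1
  by_cases h1 : c1 = []
  · simp [h1]
  · simp only [h1, if_false]
    have hwb : bWithin a delta allowed_max_abs = aWithin a delta allowed_max_abs := rfl
    rw [hwb]
    set c2 := c1.filter (aWithin a delta allowed_max_abs) with hc2
    by_cases h2 : c2 = []
    · simp [h2]
    · simp only [h2, if_false]
      set mf := c2.filter (fun (i : Nat) => decide ((i : Int) ∈ missing_indices)) with hmf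
      set cand := if mf = [] then c2 else mf with hcand
      have hlt : ∀ i ∈ cand, i < delta.length := by
        intro i hi
        have hic2 : i ∈ c2 := by
          rw [hcand] at hi
          split at hi
          · exact hi
          · exact (List.mem_filter.1 hi).1
        rw [hc2] at hic2
        have hic1 : i ∈ c1 := (List.mem_filter.1 hic2).1
        rw [hc1] at hic1
        exact List.mem_range.1 (List.mem_filter.1 hic1).1
      have hne : cand ≠ [] := by
        rw [hcand]
        split <;> assumption
      obtain ⟨b, t, hbt⟩ := List.exists_cons_of_ne_nil hne
      rw [hbt]
      exact cascade_eq_pick (aExisting a delta seen)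
        (fun (i : Nat) => decide ((i : Int) ∈ incoming_indices) && decide (delta.getD i 0 < 0))
        (fun (i : Nat) => decide ((i : Int) ∈ outgoing_indices) && decide (delta.getD i 0 > 0))
        delta.length
        (bKey a delta seen incoming_indices outgoing_indices delta.length)
        (fun i => rfl) (b :: t) (hbt ▸ hlt) b t rfl
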